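-- pv_equiv track=rewrite | github.com/Manasvini/clairvoyant2 | post_processing_scripts/cache_size_plots.py | _get_times_sizes
-- ===== SOURCE A (Python) =====
-- def _get_times_sizes(min_time, max_time, time_size_map):
--     times = []
--     sizes = []
--
--     old_size = 0
--
--     for i in range(min_time, max_time + 1):
--         times.append(i)
--
--         if i in time_size_map:
--             sizes.append(time_size_map[i])
--             old_size = time_size_map[i]
--         else:
--             sizes.append(old_size)
--
--     return times, sizes
-- ===== SOURCE B (Python) =====
-- def _get_times_sizes(min_time, max_time, time_size_map):
--     # Segment fill: sort the in-range keys once, then emit each constant run in one step.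
--     times = list(range(min_time, max_time + 1))
--     keys = sorted(k for k in time_size_map if min_time <= k <= max_time)
--     sizes = []
--     prev_val = 0
--     prev_t = min_time
--     for k in keys:
--         sizes.extend([prev_val] * (k - prev_t))
--         prev_val = time_size_map[k]
--         prev_t = k
--     sizes.extend([prev_val] * (max_time + 1 - prev_t))
--     return times, sizes
-- ===== Notes on version B (the rewrite author's own statement) =====
-- stated objective: alternative
-- what changed: A walks every timestep doing a dict lookup and carrying old_size; B sorts the in-range keys once and emits each constant run as a single list-replication segment, touching the dict only once per key.
import Mathlib
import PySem

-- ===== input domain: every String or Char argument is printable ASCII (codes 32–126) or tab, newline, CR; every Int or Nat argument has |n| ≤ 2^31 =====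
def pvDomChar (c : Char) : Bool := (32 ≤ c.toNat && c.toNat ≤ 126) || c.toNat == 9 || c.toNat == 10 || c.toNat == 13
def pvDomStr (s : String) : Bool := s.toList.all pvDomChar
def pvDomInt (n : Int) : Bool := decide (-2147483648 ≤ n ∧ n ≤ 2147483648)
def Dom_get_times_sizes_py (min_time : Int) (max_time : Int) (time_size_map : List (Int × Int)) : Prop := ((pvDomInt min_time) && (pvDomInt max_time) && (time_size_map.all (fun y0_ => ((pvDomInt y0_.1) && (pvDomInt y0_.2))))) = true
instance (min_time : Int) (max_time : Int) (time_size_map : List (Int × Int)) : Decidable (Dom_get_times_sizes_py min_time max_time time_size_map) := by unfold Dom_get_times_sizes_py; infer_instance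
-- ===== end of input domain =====

-- B replaces A's per-timestep dict lookup with one sort of the in-range keys followed by
-- emitting each constant run in a single replicate step (alternative decomposition).

-- ===== PORT A =====
-- loop body of A: append i to times; if i is a key append its value and update old_size, else append old_size
def pvStepA (d : PySem.Dict Int Int) (st : List Int × List Int × Int) (i : Int) : List Int × List Int × Int :=
  match d.get? i with
  | some v => (st.1 ++ [i], st.2.1 ++ [v], v)
  | none   => (st.1 ++ [i], st.2.1 ++ [st.2.2], st.2.2)

def get_times_sizes_py (min_time : Int) (max_time : Int) (time_size_map : List (Int × Int)) : List Int × List Int :=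
  let d := PySem.Dict.mk time_size_map
  let r := (PySem.List.pyRange min_time (max_time + 1) 1).foldl (pvStepA d) ([], [], 0)
  (r.1, r.2.1)

-- ===== PORT B =====
-- loop body of B: extend sizes by the previous run, then move to key k
-- (time_size_map[k] with k a present key: get? then getD 0 — exact, the none branch is unreachable)
def pvStepB (d : PySem.Dict Int Int) (st : List Int × Int × Int) (k : Int) : List Int × Int × Int :=
  (st.1 ++ List.replicate (k - st.2.2).toNat st.2.1, (d.get? k).getD 0, k)

def get_times_sizes_py_alt (min_time : Int) (max_time : Int) (time_size_map : List (Int × Int)) : List Int × List Int :=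
  let d := PySem.Dict.mk time_size_map
  let times := PySem.List.pyRange min_time (max_time + 1) 1
  let keys := PySem.List.sorted (d.keys.filter (fun k => decide (min_time ≤ k) && decide (k ≤ max_time))) (fun k => k) false
  let st := keys.foldl (pvStepB d) ([], 0, min_time)
  (times, st.1 ++ List.replicate (max_time + 1 - st.2.2).toNat st.2.1)

-- ===== PRECONDITION & SPEC =====
-- Pre_ excludes association lists with duplicate keys: they do not represent any Python dict
-- (the Python argument is dict[int, int], whose keys are unique), so nothing is claimed there.
def Pre_get_times_sizes_py (min_time : Int) (max_time : Int) (time_size_map : List (Int × Int)) : Prop :=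
  (time_size_map.map Prod.fst).Nodup
instance (min_time : Int) (max_time : Int) (time_size_map : List (Int × Int)) : Decidable (Pre_get_times_sizes_py min_time max_time time_size_map) := by unfold Pre_get_times_sizes_py; infer_instance

def pvWitness_get_times_sizes_py : Int × Int × (List (Int × Int)) := (0, 3, [(1, 5), (3, 2)])

def Spec_get_times_sizes_py (min_time : Int) (max_time : Int) (time_size_map : List (Int × Int)) (out : List Int × List Int) : Prop := out = get_times_sizes_py_alt min_time max_time time_size_map
instance (min_time : Int) (max_time : Int) (time_size_map : List (Int × Int)) (out : List Int × List Int) : Decidable (Spec_get_times_sizes_py min_time max_time time_size_map out) := by unfold Spec_get_times_sizes_py; infer_instance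

-- ===== CLAIM (what is proved, stated in full; the proofs are below) =====
def Claim_equal_get_times_sizes_py : Prop := ∀ (min_time : Int) (max_time : Int) (time_size_map : List (Int × Int)), Dom_get_times_sizes_py min_time max_time time_size_map → Pre_get_times_sizes_py min_time max_time time_size_map → Spec_get_times_sizes_py min_time max_time time_size_map (get_times_sizes_py min_time max_time time_size_map)

-- ===== LEMMAS AND PROOFS =====

-- the sizes list both programs produce, as segments: keys ks (strictly increasing, in range),
-- carried value o from position a up to hi
def pvSeg (d : PySem.Dict Int Int) (hi : Int) : List Int → Int → Int → List Int
  | [], o, a => List.replicate (hi + 1 - a).toNat o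
  | k :: ks, o, a => List.replicate (k - a).toNat o ++ pvSeg d hi ks ((d.get? k).getD 0) k

-- B's fold followed by the final extend IS pvSeg
theorem pvB_eq_seg (d : PySem.Dict Int Int) (hi : Int) (ks : List Int) :
    ∀ (acc : List Int) (o a : Int),
    (let st := ks.foldl (pvStepB d) (acc, o, a);
     st.1 ++ List.replicate (hi + 1 - st.2.2).toNat st.2.1) = acc ++ pvSeg d hi ks o a := by
  induction ks with
  | nil => intro acc o a; simp [pvSeg]
  | cons k ks ih =>
      intro acc o a
      simpa [pvStepB, pvSeg, List.append_assoc] using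
        ih (acc ++ List.replicate (k - a).toNat o) ((d.get? k).getD 0) k

-- A's fold over a key-free stretch appends the range and replicates the carried value
theorem pvA_nokeys (d : PySem.Dict Int Int) :
    ∀ (n : Nat) (a : Int) (ts ss : List Int) (o : Int),
    (∀ i : Int, a ≤ i → i < a + n → d.get? i = none) →
    (PySem.List.pyRange a (a + n) 1).foldl (pvStepA d) (ts, ss, o)
      = (ts ++ PySem.List.pyRange a (a + n) 1, ss ++ List.replicate n o, o) := by
  intro n
  induction n with
  | zero => intro a ts ss o _; simp [PySem.List.pyRange_one_eq_nil (by omega : a + (0:Nat) ≤ a)]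
  | succ n ih =>
      intro a ts ss o h
      have hab : a < a + (n + 1 : Nat) := by push_cast; omega
      rw [PySem.List.pyRange_one_cons hab]
      have hnone : d.get? a = none := h a le_rfl hab
      have harith : a + 1 + (n : Int) = a + ((n + 1 : Nat) : Int) := by push_cast; ring
      have := ih (a + 1) (ts ++ [a]) (ss ++ [o]) o (by
        intro i h1 h2
        exact h i (by omega) (by omega))
      rw [harith] at this
      simp only [List.foldl_cons, pvStepA, hnone, this]
      simp [List.replicate_succ]

-- one step of shrinking a segment: if every key of ks is > k and k ≤ hi, the segment
-- starting at k begins with its own value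
theorem pvSeg_cons_shift (d : PySem.Dict Int Int) (hi : Int) (ks : List Int) (v k : Int)
    (hk : k ≤ hi) (hlt : ∀ j ∈ ks, k < j) :
    pvSeg d hi ks v k = v :: pvSeg d hi ks v (k + 1) := by
  cases ks with
  | nil =>
      simp only [pvSeg]
      have : (hi + 1 - k).toNat = (hi + 1 - (k + 1)).toNat + 1 := by omega
      rw [this, List.replicate_succ]
  | cons k' ks' =>
      have hk' : k < k' := hlt k' (by simp)
      simp only [pvSeg]
      have : (k' - k).toNat = (k' - (k + 1)).toNat + 1 := by omega
      rw [this, List.replicate_succ]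
      simp

-- main invariant: A's fold over [a, hi+1) with carried value o produces exactly the
-- segments of the strictly increasing complete key list ks
theorem pvA_eq_seg (d : PySem.Dict Int Int) (hi : Int) :
    ∀ (ks : List Int) (a : Int) (ts ss : List Int) (o : Int),
    a ≤ hi + 1 →
    ks.Pairwise (· < ·) →
    (∀ k ∈ ks, a ≤ k ∧ k ≤ hi) →
    (∀ k ∈ ks, (d.get? k).isSome) →
    (∀ i : Int, a ≤ i → i ≤ hi → (d.get? i).isSome → i ∈ ks) →
    ∃ o', (PySem.List.pyRange a (hi + 1) 1).foldl (pvStepA d) (ts, ss, o)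
      = (ts ++ PySem.List.pyRange a (hi + 1) 1, ss ++ pvSeg d hi ks o a, o') := by
  intro ks
  induction ks with
  | nil =>
      intro a ts ss o ha _ _ _ hcomp
      refine ⟨o, ?_⟩
      have hn : hi + 1 = a + ((hi + 1 - a).toNat : Int) := by omega
      rw [hn]
      rw [pvA_nokeys d (hi + 1 - a).toNat a ts ss o (by
        intro i h1 h2
        by_contra hne
        have : (d.get? i).isSome := by
          cases hget : d.get? i with
          | none => exact absurd hget hne
          | some v => simp
        exact absurd (hcomp i h1 (by omega) this) (List.not_mem_nil))]
      simp [pvSeg]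
  | cons k ks ih =>
      intro a ts ss o ha hpw hbnd hmem hcomp
      obtain ⟨hak, hkhi⟩ := hbnd k (by simp)
      have hlt : ∀ j ∈ ks, k < j := fun j hj => (List.pairwise_cons.mp hpw).1 j hj
      -- no keys in [a, k)
      have hnone : ∀ i : Int, a ≤ i → i < a + ((k - a).toNat : Int) → d.get? i = none := by
        intro i h1 h2
        have hik : i < k := by omega
        cases hget : d.get? i with
        | none => rfl
        | some v =>
            have : i ∈ k :: ks := hcomp i h1 (by omega) (by simp [hget])
            rcases List.mem_cons.mp this with h | h
            · omega
            · exact absurd (hlt i h) (by omega)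
      -- split the range at k
      have hsplit : PySem.List.pyRange a (hi + 1) 1
          = PySem.List.pyRange a k 1 ++ PySem.List.pyRange k (hi + 1) 1 :=
        PySem.List.pyRange_one_append a k (hi + 1) hak (by omega)
      rw [hsplit, List.foldl_append]
      have hka : k = a + ((k - a).toNat : Int) := by omega
      rw [hka, pvA_nokeys d (k - a).toNat a ts ss o hnone, ← hka]
      -- step at the key k
      obtain ⟨v, hv⟩ := Option.isSome_iff_exists.mp (hmem k (by simp))
      rw [PySem.List.pyRange_one_cons (by omega : k < hi + 1)]
      simp only [List.foldl_cons, pvStepA, hv]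
      obtain ⟨o', ho'⟩ := ih (k + 1) (ts ++ PySem.List.pyRange a k 1 ++ [k])
        (ss ++ List.replicate (k - a).toNat o ++ [v]) v
        (by omega)
        (List.pairwise_cons.mp hpw).2
        (fun j hj => ⟨by have := hlt j hj; omega, (hbnd j (by simp [hj])).2⟩)
        (fun j hj => hmem j (by simp [hj]))
        (by
          intro i h1 h2 hs
          rcases List.mem_cons.mp (hcomp i (by omega) h2 hs) with h | h
          · omega
          · exact h)
      refine ⟨o', ?_⟩
      rw [ho']
      have hgd : v = (d.get? k).getD 0 := by simp [hv]
      refine Prod.ext ?_ (Prod.ext ?_ rfl)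
      · simp
      · simp only [pvSeg]
        rw [pvSeg_cons_shift d hi ks ((d.get? k).getD 0) k hkhi hlt, ← hgd]
        simp

-- the sorted filtered key list satisfies the hypotheses of pvA_eq_seg
theorem pv_keys_sorted_lt (xs : List Int) (h : xs.Nodup) :
    (PySem.List.sorted xs (fun k => k) false).Pairwise (· < ·) := by
  have hperm := PySem.List.sorted_perm xs (fun k => k) false
  have hnd : (PySem.List.sorted xs (fun k => k) false).Nodup := hperm.nodup_iff.mpr h
  have hle := PySem.List.sorted_pairwise xs (fun k => k)
  exact (hle.and hnd).imp fun h => lt_of_le_of_ne h.1 h.2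

-- ===== VERDICT (by name: the statement is the Claim_ definition above) =====
theorem get_times_sizes_py_spec : Claim_equal_get_times_sizes_py := by
  intro mn mx tsm _ hpre
  unfold Spec_get_times_sizes_py get_times_sizes_py get_times_sizes_py_alt
  set d := PySem.Dict.mk tsm with hd
  have hkeys : d.keys = tsm.map Prod.fst := by simp [hd, PySem.Dict.keys]
  set ks := PySem.List.sorted (d.keys.filter (fun k => decide (mn ≤ k) && decide (k ≤ mx))) (fun k => k) false with hks
  have hperm := PySem.List.sorted_perm (d.keys.filter (fun k => decide (mn ≤ k) && decide (k ≤ mx))) (fun k => k) false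
  have hmemks : ∀ k, k ∈ ks ↔ (k ∈ d.keys ∧ mn ≤ k ∧ k ≤ mx) := by
    intro k
    rw [hks, PySem.List.mem_sorted, List.mem_filter]
    simp
  by_cases hrange : mn ≤ mx + 1
  · -- nonempty (or exactly empty-at-boundary) range
    have hpw : ks.Pairwise (· < ·) := by
      apply pv_keys_sorted_lt
      rw [hkeys]; exact hpre.filter _
    have hbnd : ∀ k ∈ ks, mn ≤ k ∧ k ≤ mx := fun k hk => ((hmemks k).mp hk).2
    have hmem : ∀ k ∈ ks, (d.get? k).isSome := by
      intro k hk
      have hkk : k ∈ d.keys := ((hmemks k).mp hk).1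
      cases hget : d.get? k with
      | none => exact absurd hkk ((PySem.Dict.get?_eq_none_iff_not_mem_keys d k).mp hget)
      | some v => simp
    have hcomp : ∀ i : Int, mn ≤ i → i ≤ mx → (d.get? i).isSome → i ∈ ks := by
      intro i h1 h2 hs
      refine (hmemks i).mpr ⟨?_, h1, h2⟩
      cases hget : d.get? i with
      | none => simp [hget] at hs
      | some v =>
          by_contra hni
          exact absurd ((PySem.Dict.get?_eq_none_iff_not_mem_keys d i).mpr hni) (by simp [hget])
    obtain ⟨o', ho'⟩ := pvA_eq_seg d mx ks mn [] [] 0 hrange hpw hbnd hmem hcomp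
    have hb := pvB_eq_seg d mx ks [] 0 mn
    simp only [ho']
    simp only at hb
    exact Prod.ext (by simp) (by rw [hb])
  · -- empty range: both sides are ([], [])
    have hempty : PySem.List.pyRange mn (mx + 1) 1 = [] :=
      PySem.List.pyRange_one_eq_nil (by omega)
    have hksnil : ks = [] := by
      cases hksc : ks with
      | nil => rfl
      | cons k t =>
          have := (hmemks k).mp (by simp [hksc])
          omega
    have h0 : (mx + 1 - mn).toNat = 0 := by omega
    simp only [hempty]
    rw [← hks, hksnil]
    exact Prod.ext rfl (by simp [h0])
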